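-- pv_equiv track=rewrite | github.com/shunjuu/Izumi | new_file.py | get_temp_dir
-- ===== SOURCE A (Python) =====
-- def get_temp_dir(src_dir, dl_folder):
--     """
--     A modifer that gets the temporary working dir to generate MP4 files.
--     params:
--     - src_dir: The source directory of the new file.
--         - It should be of the form: "...../Public/.Nyaa/{series name}..."
--     """
--     # Split the path by / into an array of strings
--     original_path = src_dir.split('/')
--     new_path = str()
--     for folder in original_path:
--         if folder == dl_folder:
--             break
--         if folder:
--             new_path = new_path + "/" + folder
--
--     new_path += "/"
--     new_path = new_path + ".temp/"
--
--     return new_path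
-- ===== SOURCE B (Python) =====
-- def get_temp_dir(src_dir, dl_folder):
--     # Single character-level scan (state machine); never calls split.
--     pieces = []
--     comp = []
--     for ch in src_dir + '/':  # sentinel terminator closes the last component
--         if ch == '/':
--             name = ''.join(comp)
--             if name == dl_folder:
--                 break
--             if name:
--                 pieces.append('/' + name)
--             comp = []
--         else:
--             comp.append(ch)
--     return ''.join(pieces) + '/.temp/'
-- ===== Notes on version B (the rewrite author's own statement) =====
-- stated objective: alternative
-- what changed: B never splits the path: it scans src_dir character by character with a state machine (current-component buffer, sentinel '/' terminator), deciding at each '/' boundary whether to stop, emit or drop the component, instead of A's split-then-loop over the component list.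
import Mathlib
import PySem

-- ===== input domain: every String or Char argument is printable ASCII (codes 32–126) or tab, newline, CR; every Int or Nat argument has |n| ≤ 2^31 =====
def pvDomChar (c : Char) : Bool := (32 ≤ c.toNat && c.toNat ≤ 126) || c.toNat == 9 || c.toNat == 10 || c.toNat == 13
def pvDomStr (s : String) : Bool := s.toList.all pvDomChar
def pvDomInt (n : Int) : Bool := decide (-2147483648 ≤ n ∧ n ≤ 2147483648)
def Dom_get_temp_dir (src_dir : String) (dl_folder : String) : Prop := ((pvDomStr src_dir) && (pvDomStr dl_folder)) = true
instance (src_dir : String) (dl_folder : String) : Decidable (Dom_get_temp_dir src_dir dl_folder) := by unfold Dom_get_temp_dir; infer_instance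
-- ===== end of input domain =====

-- B replaces A's split-then-loop by a single character-level state machine (no split); same cost, alternative algorithm.

-- ===== PORT A =====
-- A's for-loop with its break, over the '/'-split parts (strings handled as List Char via PySem.Chars)
def pvLoopA (dl : List Char) : List (List Char) → List Char → List Char
  | [], acc => acc
  | f :: rest, acc =>
    if f = dl then acc
    else if f ≠ [] then pvLoopA dl rest (acc ++ ['/'] ++ f)
    else pvLoopA dl rest acc

def get_temp_dir (src_dir : String) (dl_folder : String) : String :=
  let original_path := PySem.Chars.splitOn src_dir.toList ['/']
  let new_path := pvLoopA dl_folder.toList original_path []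
  String.ofList (new_path ++ ['/'] ++ ".temp/".toList)

-- ===== PORT B =====
-- Source B's character scan: state = (emitted pieces `out`, current component buffer `comp`);
-- at each '/' the buffered component is tested (break / emit / drop); input is src ++ ['/'] (sentinel)
def pvScanB (dl : List Char) : List Char → List Char → List Char → List Char
  | [], out, _comp => out ++ "/.temp/".toList
  | ch :: rest, out, comp =>
    if ch = '/' then
      if comp = dl then out ++ "/.temp/".toList
      else pvScanB dl rest (if comp ≠ [] then out ++ ['/'] ++ comp else out) []
    else pvScanB dl rest out (comp ++ [ch])

def get_temp_dir_alt (src_dir : String) (dl_folder : String) : String :=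
  String.ofList (pvScanB dl_folder.toList (src_dir.toList ++ ['/']) [] [])

-- ===== PRECONDITION & SPEC =====
def Spec_get_temp_dir (src_dir : String) (dl_folder : String) (out : String) : Prop := out = get_temp_dir_alt src_dir dl_folder
instance (src_dir : String) (dl_folder : String) (out : String) : Decidable (Spec_get_temp_dir src_dir dl_folder out) := by unfold Spec_get_temp_dir; infer_instance

-- ===== CLAIM (what is proved, stated in full; the proofs are below) =====
def Claim_equal_get_temp_dir : Prop := ∀ (src_dir : String) (dl_folder : String), Dom_get_temp_dir src_dir dl_folder → Spec_get_temp_dir src_dir dl_folder (get_temp_dir src_dir dl_folder)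

-- ===== LEMMAS AND PROOFS =====

-- a simple structural recursion computing split('/') (proof-side only)
def pvMySplit : List Char → List (List Char)
  | [] => [[]]
  | c :: rest =>
    if c = '/' then [] :: pvMySplit rest
    else match pvMySplit rest with
      | [] => [[c]]
      | p :: ps => (c :: p) :: ps

def pvMapHead (f : List Char → List Char) : List (List Char) → List (List Char)
  | [] => []
  | p :: ps => f p :: ps

theorem pvMySplit_ne_nil : ∀ cs : List Char, pvMySplit cs ≠ []
  | [] => by simp [pvMySplit]
  | c :: rest => by
    simp only [pvMySplit]
    split_ifs
    · simp
    · cases h : pvMySplit rest <;> simp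

theorem pv_go_spec : ∀ (cs : List Char) (cur : List Char) (acc : List (List Char)) (fuel : Nat),
    cs.length < fuel →
    PySem.Chars.splitOn.go ['/'] fuel cs cur acc
      = acc.reverse ++ pvMapHead (cur.reverse ++ ·) (pvMySplit cs)
  | [], cur, acc, fuel, h => by
    cases fuel with
    | zero => omega
    | succ n => simp [PySem.Chars.splitOn.go, pvMySplit, pvMapHead]
  | c :: rest, cur, acc, fuel, h => by
    cases fuel with
    | zero => omega
    | succ n =>
      by_cases hc : c = '/'
      · subst hc
        rw [show PySem.Chars.splitOn.go ['/'] (n+1) ('/' :: rest) cur acc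
              = PySem.Chars.splitOn.go ['/'] n rest [] (cur.reverse :: acc) by
            simp [PySem.Chars.splitOn.go, List.isPrefixOf]]
        rw [pv_go_spec rest [] (cur.reverse :: acc) n (by simpa using Nat.lt_of_succ_lt_succ h)]
        simp only [pvMySplit, reduceIte]
        cases hms : pvMySplit rest with
        | nil => exact absurd hms (pvMySplit_ne_nil rest)
        | cons p ps => simp [pvMapHead]
      · rw [show PySem.Chars.splitOn.go ['/'] (n+1) (c :: rest) cur acc
              = PySem.Chars.splitOn.go ['/'] n rest (c :: cur) acc by
            simp [PySem.Chars.splitOn.go, List.isPrefixOf, Ne.symm hc]]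
        rw [pv_go_spec rest (c :: cur) acc n (by simpa using Nat.lt_of_succ_lt_succ h)]
        simp only [pvMySplit, if_neg hc]
        cases hms : pvMySplit rest with
        | nil => exact absurd hms (pvMySplit_ne_nil rest)
        | cons p ps => simp [pvMapHead]

theorem pv_splitOn_eq (cs : List Char) :
    PySem.Chars.splitOn cs ['/'] = pvMySplit cs := by
  unfold PySem.Chars.splitOn
  rw [pv_go_spec cs [] [] (cs.length + 1) (by omega)]
  cases hms : pvMySplit cs with
  | nil => exact absurd hms (pvMySplit_ne_nil cs)
  | cons p ps => simp [pvMapHead]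

-- the component-level loop that both sides reduce to
def pvLoopB (dl : List Char) : List (List Char) → List Char → List Char
  | [], out => out ++ "/.temp/".toList
  | f :: rest, out =>
    if f = dl then out ++ "/.temp/".toList
    else pvLoopB dl rest (if f ≠ [] then out ++ ['/'] ++ f else out)

theorem pv_loopA_eq_loopB (dl : List Char) :
    ∀ (parts : List (List Char)) (acc : List Char),
      pvLoopA dl parts acc ++ ['/'] ++ ".temp/".toList = pvLoopB dl parts acc
  | [], acc => by simp [pvLoopA, pvLoopB]
  | f :: rest, acc => by
    by_cases h : f = dl
    · subst h; simp [pvLoopA, pvLoopB]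
    · by_cases he : f = []
      · subst he
        simp only [pvLoopA, pvLoopB, if_neg h]
        simpa using pv_loopA_eq_loopB dl rest acc
      · simp only [pvLoopA, pvLoopB, if_neg h, if_pos (by simpa using he)]
        exact pv_loopA_eq_loopB dl rest _

theorem pv_scan_eq_loopB (dl : List Char) :
    ∀ (cs : List Char) (out comp : List Char),
      pvScanB dl (cs ++ ['/']) out comp
        = pvLoopB dl (pvMapHead (comp ++ ·) (pvMySplit cs)) out
  | [], out, comp => by
    simp only [List.nil_append, pvScanB, pvMySplit, pvMapHead, List.append_nil]
    by_cases h : comp = dl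
    · simp [pvLoopB, h]
    · simp [pvLoopB, h]
  | c :: rest, out, comp => by
    by_cases hc : c = '/'
    · subst hc
      simp only [List.cons_append, pvScanB, pvMySplit, pvMapHead]
      by_cases h : comp = dl
      · simp [pvLoopB, h]
      · rw [if_neg h, pv_scan_eq_loopB dl rest _ []]
        cases hms : pvMySplit rest with
        | nil => exact absurd hms (pvMySplit_ne_nil rest)
        | cons p ps => simp [pvMapHead, pvLoopB, h]
    · simp only [List.cons_append, pvScanB, if_neg hc]
      rw [pv_scan_eq_loopB dl rest out (comp ++ [c])]
      simp only [pvMySplit, if_neg hc]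
      cases hms : pvMySplit rest with
      | nil => exact absurd hms (pvMySplit_ne_nil rest)
      | cons p ps => simp [pvMapHead]

-- ===== VERDICT (by name: the statement is the Claim_ definition above) =====
theorem get_temp_dir_spec : Claim_equal_get_temp_dir := by
  intro src dl _
  unfold Spec_get_temp_dir get_temp_dir get_temp_dir_alt
  simp only []
  rw [pv_splitOn_eq, pv_loopA_eq_loopB, pv_scan_eq_loopB]
  cases hms : pvMySplit src.toList with
  | nil => exact absurd hms (pvMySplit_ne_nil src.toList)
  | cons p ps => simp [pvMapHead]
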